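-- pv_equiv track=rewrite | github.com/CagySloth/COMP4801 | algorithms/diploid/mst.py | mst_forest
-- ===== SOURCE A (Python) =====
-- from typing import List, Tuple
--
-- class DSU:
--     def __init__(self, n: int):
--         self.p = list(range(n))
--         self.r = [0] * n
--
--     def find(self, x: int) -> int:
--         while self.p[x] != x:
--             self.p[x] = self.p[self.p[x]]
--             x = self.p[x]
--         return x
--
--     def union(self, a: int, b: int) -> bool:
--         ra, rb = self.find(a), self.find(b)
--         if ra == rb:
--             return False
--         if self.r[ra] < self.r[rb]:
--             ra, rb = rb, ra
--         self.p[rb] = ra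
--         if self.r[ra] == self.r[rb]:
--             self.r[ra] += 1
--         return True
--
-- def mst_forest(M: int, edges: List[Tuple[int, int, int, int]]) -> List[List[Tuple[int, int, int]]]:
--     """
--     Build maximum spanning forest using Kruskal.
--     Returns adjacency list: adj[u] = list of (v, parity), using het-indexed nodes 0..M-1.
--     """
--     dsu = DSU(M)
--     adj = [[] for _ in range(M)]
--     for wabs, u, v, parity in edges:
--         if dsu.union(u, v):
--             # Add undirected edge with parity
--             adj[u].append((v, parity))
--             adj[v].append((u, parity))
--     return adj
-- ===== SOURCE B (Python) =====
-- def mst_forest(M, edges):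
--     comp = list(range(M))
--     adj = [[] for _ in range(M)]
--     for wabs, u, v, parity in edges:
--         cu, cv = comp[u], comp[v]
--         if cu != cv:
--             adj[u].append((v, parity))
--             adj[v].append((u, parity))
--             comp = [cu if c == cv else c for c in comp]
--     return adj
-- ===== Notes on version B (the rewrite author's own statement) =====
-- stated objective: simpler
-- what changed: Replaces the DSU (union-find with path-halving find and union by rank) by a flat component-label list merged by relabelling every node of one component in a single plain pass over the edges.
import Mathlib
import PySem

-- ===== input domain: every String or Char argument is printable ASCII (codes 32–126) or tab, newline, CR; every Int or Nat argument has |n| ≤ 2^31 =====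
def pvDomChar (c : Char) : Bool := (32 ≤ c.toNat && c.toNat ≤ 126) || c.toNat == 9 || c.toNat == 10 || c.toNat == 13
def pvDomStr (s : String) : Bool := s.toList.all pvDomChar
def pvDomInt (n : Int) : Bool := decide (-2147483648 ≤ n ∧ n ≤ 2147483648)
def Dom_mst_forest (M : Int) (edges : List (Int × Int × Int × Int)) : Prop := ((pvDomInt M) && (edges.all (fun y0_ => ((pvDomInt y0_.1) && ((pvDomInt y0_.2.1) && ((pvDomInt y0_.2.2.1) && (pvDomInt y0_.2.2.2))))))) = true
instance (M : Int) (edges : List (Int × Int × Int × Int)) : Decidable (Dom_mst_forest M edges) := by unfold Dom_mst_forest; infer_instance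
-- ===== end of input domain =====

-- B replaces the DSU (path-halving find, union by rank) of A with a flat component-label
-- list merged by relabelling; objective: simpler (one plain pass, no union-find machinery).

-- ===== PORT A =====
-- p[i] / comp[i] as Python reads it (negative index wraps); out-of-range (IndexError) is excluded by Pre_.
def pvGet (l : List Int) (i : Int) : Int := PySem.List.pyGetD l i 0

-- DSU.find: 'while p[x] != x: p[x] = p[p[x]]; x = p[x]'.  The fuel (p.length + 1 at the call
-- site) only makes the Python while-loop structurally recursive; it is proved sufficient below.
def dsuFind : Nat → List Int → Int → List Int × Int
  | 0, p, x => (p, x)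
  | fuel+1, p, x =>
    if pvGet p x = x then (p, x)
    else
      let p1 := PySem.List.pySetD p x (pvGet p (pvGet p x))
      dsuFind fuel p1 (pvGet p1 x)

-- DSU.union, returning (accepted, p, r)
def dsuUnion (p r : List Int) (a b : Int) : Bool × List Int × List Int :=
  let fa := dsuFind (p.length + 1) p a
  let p1 := fa.1
  let ra := fa.2
  let fb := dsuFind (p1.length + 1) p1 b
  let p2 := fb.1
  let rb := fb.2
  if ra = rb then (false, p2, r)
  else
    let pr := if pvGet r ra < pvGet r rb then (rb, ra) else (ra, rb)
    let p3 := PySem.List.pySetD p2 pr.2 pr.1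
    let r' := if pvGet r pr.1 = pvGet r pr.2 then PySem.List.pySetD r pr.1 (pvGet r pr.1 + 1) else r
    (true, p3, r')

-- loop body of A: state (dsu.p, dsu.r, adj)
def mstStepA (st : List Int × List Int × List (List (Int × Int))) (e : Int × Int × Int × Int) :
    List Int × List Int × List (List (Int × Int)) :=
  match st, e with
  | (p, r, adj), (_wabs, u, v, parity) =>
    let res := dsuUnion p r u v
    if res.1 then
      let adj1 := PySem.List.pySetD adj u (PySem.List.pyGetD adj u [] ++ [(v, parity)])
      let adj2 := PySem.List.pySetD adj1 v (PySem.List.pyGetD adj1 v [] ++ [(u, parity)])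
      (res.2.1, res.2.2, adj2)
    else (res.2.1, res.2.2, adj)

def mst_forest (M : Int) (edges : List (Int × Int × Int × Int)) : List (List (Int × Int)) :=
  let p0 := PySem.List.pyRange 0 M 1
  let r0 := List.replicate M.toNat (0 : Int)
  let adj0 := (PySem.List.pyRange 0 M 1).map (fun _ => ([] : List (Int × Int)))
  (edges.foldl mstStepA (p0, r0, adj0)).2.2

-- ===== PORT B =====
-- loop body of B: state (comp, adj); merge = rewrite every label equal to comp[v] to comp[u]
def mstStepB (st : List Int × List (List (Int × Int))) (e : Int × Int × Int × Int) :
    List Int × List (List (Int × Int)) :=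
  match st, e with
  | (comp, adj), (_wabs, u, v, parity) =>
    let cu := pvGet comp u
    let cv := pvGet comp v
    if cu ≠ cv then
      let adj1 := PySem.List.pySetD adj u (PySem.List.pyGetD adj u [] ++ [(v, parity)])
      let adj2 := PySem.List.pySetD adj1 v (PySem.List.pyGetD adj1 v [] ++ [(u, parity)])
      (comp.map (fun c => if c = cv then cu else c), adj2)
    else (comp, adj)

def mst_forest_alt (M : Int) (edges : List (Int × Int × Int × Int)) : List (List (Int × Int)) :=
  (edges.foldl mstStepB
    (PySem.List.pyRange 0 M 1,
     (PySem.List.pyRange 0 M 1).map (fun _ => ([] : List (Int × Int))))).2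

-- ===== PRECONDITION & SPEC =====
-- Pre_ excludes exactly the inputs on which A raises IndexError: an edge endpoint outside
-- Python's valid index range -M..M-1 for the parent list of length M.
def Pre_mst_forest (M : Int) (edges : List (Int × Int × Int × Int)) : Prop :=
  ∀ e ∈ edges, (-M ≤ e.2.1 ∧ e.2.1 < M) ∧ (-M ≤ e.2.2.1 ∧ e.2.2.1 < M)
instance (M : Int) (edges : List (Int × Int × Int × Int)) : Decidable (Pre_mst_forest M edges) := by
  unfold Pre_mst_forest; infer_instance

def pvWitness_mst_forest : Int × (List (Int × Int × Int × Int)) :=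
  (3, [(5, 0, 1, 1), (4, 1, 2, 0), (2, 0, 2, 1)])

def Spec_mst_forest (M : Int) (edges : List (Int × Int × Int × Int)) (out : List (List (Int × Int))) : Prop :=
  out = mst_forest_alt M edges
instance (M : Int) (edges : List (Int × Int × Int × Int)) (out : List (List (Int × Int))) :
    Decidable (Spec_mst_forest M edges out) := by unfold Spec_mst_forest; infer_instance

-- ===== CLAIM (what is proved, stated in full; the proofs are below) =====
def Claim_equal_mst_forest : Prop := ∀ (M : Int) (edges : List (Int × Int × Int × Int)), Dom_mst_forest M edges → Pre_mst_forest M edges → Spec_mst_forest M edges (mst_forest M edges)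

-- ===== LEMMAS AND PROOFS =====

-- x is a valid nonnegative index of p
def pvIdx (p : List Int) (x : Int) : Prop := 0 ≤ x ∧ x < (p.length : Int)

-- x is a valid Python index of p (negative allowed)
def pvInR (n : Nat) (x : Int) : Prop := -(n : Int) ≤ x ∧ x < (n : Int)

-- every stored parent of an in-range node is an in-range nonnegative node
def pvClosed (p : List Int) : Prop := ∀ x, pvIdx p x → pvIdx p (pvGet p x)

-- node x reaches the root r by following parent pointers
inductive pvReach (p : List Int) : Int → Int → Prop
  | refl (x : Int) (h : pvGet p x = x) : pvReach p x x
  | step (x r : Int) (h : pvGet p x ≠ x) (h2 : pvReach p (pvGet p x) r) : pvReach p x r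

def pvTotal (p : List Int) : Prop := ∀ x, pvIdx p x → ∃ r, pvReach p x r

-- fuelled iteration of the parent map
def pvRootF : Nat → List Int → Int → Int
  | 0, _, x => x
  | k+1, p, x => if pvGet p x = x then x else pvRootF k p (pvGet p x)

-- x reaches the fixed point r in exactly (minimally) k steps
def pvDist (p : List Int) (x r : Int) (k : Nat) : Prop :=
  pvRootF k p x = r ∧ pvGet p r = r ∧ ∀ j < k, pvRootF j p x ≠ r

def pvSame (p : List Int) (x y : Int) : Prop := ∃ s, pvReach p x s ∧ pvReach p y s

-- coupling invariant between A's parent list and B's label list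
def pvInv (n : Nat) (p comp : List Int) : Prop :=
  p.length = n ∧ comp.length = n ∧ pvClosed p ∧ pvTotal p ∧
  ∀ x y, pvIdx p x → pvIdx p y → (pvSame p x y ↔ pvGet comp x = pvGet comp y)

-- ---- basic indexing lemmas ----

theorem pvGet_nonneg (p : List Int) (i : Int) (h : 0 ≤ i) : pvGet p i = p.getD i.toNat 0 := by
  simp [pvGet, PySem.List.pyGetD, PySem.List.pyGet?, PySem.List.pyIdx?, h, List.getD]
  split
  · rfl
  · rename_i hlt
    rw [List.getElem?_eq_none (by omega)]
    rfl

theorem pvLen_set (p : List Int) (i : Int) (v : Int) :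
    (PySem.List.pySetD p i v).length = p.length := by
  simp [PySem.List.pySetD, PySem.List.pySet?, PySem.List.pyIdx?]
  split <;> split <;> simp

theorem pvGet_set (p : List Int) (i j v : Int) (hi : pvIdx p i) (hj : 0 ≤ j) :
    pvGet (PySem.List.pySetD p i v) j = if j = i then v else pvGet p j := by
  rcases hi with ⟨hi0, hi1⟩
  rw [PySem.List.pySetD_of_nonneg p v hi0, pvGet_nonneg _ _ hj, pvGet_nonneg _ _ hj]
  simp only [List.getD, List.getElem?_set]
  by_cases h : j = i
  · rw [if_pos (by omega), if_pos (by omega : i.toNat < p.length), if_pos h]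
    rfl
  · rw [if_neg (by omega), if_neg h]

theorem pvGet_wrap (p : List Int) (u : Int) (h1 : -(p.length : Int) ≤ u) (h2 : u < 0) :
    pvGet p u = pvGet p (u + p.length) := by
  have e : p.length - (-u).toNat = (u + p.length).toNat := by omega
  simp only [pvGet, PySem.List.pyGetD, PySem.List.pyGet?, PySem.List.pyIdx?]
  rw [if_neg (by omega), if_pos (by omega), if_pos (by omega : (0:Int) ≤ u + p.length),
    if_pos (by omega : u + (p.length:Int) < p.length), e]

theorem pvSet_wrap (p : List Int) (u : Int) (v : Int) (h1 : -(p.length : Int) ≤ u) (h2 : u < 0) :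
    PySem.List.pySetD p u v = PySem.List.pySetD p (u + p.length) v := by
  have e : p.length - (-u).toNat = (u + p.length).toNat := by omega
  simp only [PySem.List.pySetD, PySem.List.pySet?, PySem.List.pyIdx?]
  rw [if_neg (by omega), if_pos (by omega), if_pos (by omega : (0:Int) ≤ u + p.length),
    if_pos (by omega : u + (p.length:Int) < p.length), e]

theorem pvSet_self (p : List Int) (x : Int) (h : pvInR p.length x) :
    PySem.List.pySetD p x (pvGet p x) = p := by
  rcases h with ⟨h1, h2⟩
  by_cases h0 : 0 ≤ x
  · rw [PySem.List.pySetD_of_nonneg p _ h0, pvGet_nonneg p x h0]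
    apply List.ext_getElem (by simp)
    intro i hi1 hi2
    simp only [List.getElem_set]
    split
    · rename_i he
      subst he
      rw [List.getD_eq_getElem _ _ (by omega)]
    · rfl
  · rw [pvSet_wrap p x _ h1 (by omega), pvGet_wrap p x h1 (by omega),
      PySem.List.pySetD_of_nonneg p _ (by omega : (0:Int) ≤ x + p.length),
      pvGet_nonneg p _ (by omega : (0:Int) ≤ x + p.length)]
    apply List.ext_getElem (by simp)
    intro i hi1 hi2
    simp only [List.getElem_set]
    split
    · rename_i he
      subst he
      rw [List.getD_eq_getElem _ _ (by omega)]
    · rfl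

theorem pvGet_map (comp : List Int) (f : Int → Int) (x : Int) (hx : 0 ≤ x)
    (hx2 : x < (comp.length : Int)) : pvGet (comp.map f) x = f (pvGet comp x) := by
  rw [pvGet_nonneg _ _ hx, pvGet_nonneg _ _ hx]
  rw [List.getD_eq_getElem _ _ (by simpa using (by omega : x.toNat < comp.length)),
      List.getD_eq_getElem _ _ (by omega : x.toNat < comp.length)]
  simp

theorem pvGet_idx_ofInR (p : List Int) (x : Int) (hc : pvClosed p) (h : pvInR p.length x) :
    pvIdx p (pvGet p x) := by
  obtain ⟨ha, hb⟩ := h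
  by_cases h0 : 0 ≤ x
  · exact hc x ⟨h0, hb⟩
  · rw [pvGet_wrap p x ha (by omega)]
    exact hc _ ⟨by omega, by omega⟩

-- ---- pvReach basics ----

theorem pvReach_fix {p : List Int} {x r : Int} (h : pvReach p x r) : pvGet p r = r := by
  induction h with
  | refl x h => exact h
  | step x r h h2 ih => exact ih

theorem pvReach_unique {p : List Int} {x r s : Int} (h1 : pvReach p x r) (h2 : pvReach p x s) :
    r = s := by
  induction h1 with
  | refl x h =>
    cases h2 with
    | refl => rfl
    | step _ _ hq hq2 => exact absurd h hq
  | step x r h h2 ih =>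
    cases h2 with
    | refl _ hq => exact absurd hq h
    | step _ _ hq hq2 => exact ih hq2

theorem pvReach_idx {p : List Int} {x r : Int} (hc : pvClosed p) (hx : pvIdx p x)
    (h : pvReach p x r) : pvIdx p r := by
  revert hx
  induction h with
  | refl x h => exact id
  | step x r h h2 ih => exact fun hx => ih (hc x hx)

theorem pvIdx_set_iff (p : List Int) (i v z : Int) :
    pvIdx (PySem.List.pySetD p i v) z ↔ pvIdx p z := by
  unfold pvIdx
  rw [pvLen_set]

theorem pvReach_wrap {p : List Int} {u s : Int} (hc : pvClosed p)
    (h1 : -(p.length : Int) ≤ u) (h2 : u < 0) :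
    pvReach p u s ↔ pvReach p (u + p.length) s := by
  have hg : pvIdx p (pvGet p u) := pvGet_idx_ofInR p u hc ⟨h1, by omega⟩
  have hw := pvGet_wrap p u h1 h2
  constructor
  · intro h
    cases h with
    | refl x hfix =>
      exfalso
      have h0 := hg.1
      rw [hfix] at h0
      omega
    | step x r hne hr2 =>
      rw [hw] at hr2
      by_cases hf : pvGet p (u + p.length) = u + p.length
      · rw [hf] at hr2
        exact hr2
      · exact pvReach.step _ _ hf hr2
  · intro h
    cases h with
    | refl x hfix =>
      refine pvReach.step _ _ ?_ ?_
      · rw [hw, hfix]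
        intro e
        omega
      · rw [hw, hfix]
        exact pvReach.refl _ hfix
    | step x r hne hr2 =>
      refine pvReach.step _ _ ?_ ?_
      · rw [hw]
        intro e
        have h0 := hg.1
        rw [hw] at h0
        omega
      · rw [hw]
        exact hr2

-- ---- pvRootF basics ----

theorem pvRootF_stable {p : List Int} {x : Int} (h : pvGet p x = x) (k : Nat) :
    pvRootF k p x = x := by
  induction k with
  | zero => rfl
  | succ k ih => simp [pvRootF, h]

theorem pvRootF_add (i j : Nat) (p : List Int) (x : Int) :
    pvRootF (i + j) p x = pvRootF j p (pvRootF i p x) := by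
  induction i generalizing x with
  | zero => simp [pvRootF]
  | succ i ih =>
    by_cases h : pvGet p x = x
    · rw [pvRootF_stable h, pvRootF_stable h, pvRootF_stable h]
    · have e1 : i + 1 + j = (i + j) + 1 := by omega
      rw [e1]
      show (if pvGet p x = x then x else pvRootF (i + j) p (pvGet p x)) = _
      rw [if_neg h, ih]
      congr 1
      show _ = (if pvGet p x = x then x else pvRootF i p (pvGet p x))
      rw [if_neg h]

theorem pvRootF_idx {p : List Int} {x : Int} (hc : pvClosed p) (hx : pvIdx p x) (k : Nat) :
    pvIdx p (pvRootF k p x) := by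
  induction k generalizing x with
  | zero => exact hx
  | succ k ih =>
    show pvIdx p (if pvGet p x = x then x else pvRootF k p (pvGet p x))
    split
    · exact hx
    · exact ih (hc x hx)

theorem pvRootF_ge {p : List Int} {x r : Int} {k : Nat} (h : pvRootF k p x = r)
    (hfix : pvGet p r = r) {m : Nat} (hm : k ≤ m) : pvRootF m p x = r := by
  have e : m = k + (m - k) := by omega
  rw [e, pvRootF_add, h, pvRootF_stable hfix]

theorem pvReach_toFuel {p : List Int} {x r : Int} (h : pvReach p x r) :
    ∃ k, pvRootF k p x = r := by
  induction h with
  | refl x h => exact ⟨0, rfl⟩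
  | step x r h h2 ih =>
    obtain ⟨k, hk⟩ := ih
    exact ⟨k + 1, by simp [pvRootF, h, hk]⟩

theorem pvReach_ofFuel {p : List Int} {x r : Int} {k : Nat} (h : pvRootF k p x = r)
    (hfix : pvGet p r = r) : pvReach p x r := by
  induction k generalizing x with
  | zero => subst h; exact pvReach.refl _ hfix
  | succ k ih =>
    by_cases h1 : pvGet p x = x
    · rw [pvRootF_stable h1] at h
      subst h
      exact pvReach.refl _ hfix
    · have h2 : pvRootF k p (pvGet p x) = r := by
        rw [← h]
        show _ = (if pvGet p x = x then x else pvRootF k p (pvGet p x))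
        rw [if_neg h1]
      exact pvReach.step _ _ h1 (ih h2)

theorem pvDist_exists {p : List Int} {x r : Int} (h : pvReach p x r) :
    ∃ k, pvDist p x r k := by
  have hfix := pvReach_fix h
  obtain ⟨k, hk⟩ := pvReach_toFuel h
  have hex : ∃ k, pvRootF k p x = r := ⟨k, hk⟩
  refine ⟨Nat.find hex, Nat.find_spec hex, hfix, ?_⟩
  intro j hj
  exact Nat.find_min hex hj

-- minimal distances are bounded by the number of nodes (paths are simple: pigeonhole)
theorem pvDist_lt {p : List Int} {x r : Int} {k : Nat} (hc : pvClosed p) (hx : pvIdx p x)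
    (h : pvDist p x r k) : k < p.length := by
  obtain ⟨hroot, hfix, hmin⟩ := h
  have hidx : ∀ j, pvIdx p (pvRootF j p x) := fun j => pvRootF_idx hc hx j
  have hinj : ∀ i j, i < j → j ≤ k → pvRootF i p x ≠ pvRootF j p x := by
    intro i j hij hjk he
    have hstep : ∀ m, pvRootF (i + m) p x = pvRootF (j + m) p x := by
      intro m
      rw [pvRootF_add, pvRootF_add, he]
    have h2 : pvRootF (i + (k - j)) p x = r := by
      rw [hstep, show j + (k - j) = k from by omega, hroot]
    exact hmin _ (by omega) h2
  have hinj2 : Set.InjOn (fun j => pvRootF j p x) (Finset.range (k + 1)) := by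
    intro a ha b hb hab
    simp only [Finset.coe_range, Set.mem_Iio] at ha hb
    rcases lt_trichotomy a b with h | h | h
    · exact absurd hab (hinj a b h (by omega))
    · exact h
    · exact absurd hab.symm (hinj b a h (by omega))
  have himg : (Finset.range (k + 1)).image (fun j => pvRootF j p x) ⊆
      Finset.Ico (0 : Int) (p.length : Int) := by
    intro z hz
    simp only [Finset.mem_image, Finset.mem_range] at hz
    obtain ⟨j, _, rfl⟩ := hz
    simp only [Finset.mem_Ico]
    exact ⟨(hidx j).1, (hidx j).2⟩
  have hle := Finset.card_le_card himg
  rw [Finset.card_image_of_injOn hinj2, Finset.card_range, Int.card_Ico] at hle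
  omega

theorem pvDist_le {p : List Int} {u r : Int} {k : Nat} (hc : pvClosed p)
    (hu : pvInR p.length u) (h : pvDist p u r k) : k ≤ p.length := by
  by_cases h0 : 0 ≤ u
  · exact (pvDist_lt hc ⟨h0, hu.2⟩ h).le
  · obtain ⟨hroot, hfix, hmin⟩ := h
    have hbidx : pvIdx p (pvGet p u) := pvGet_idx_ofInR p u hc hu
    have hne : pvGet p u ≠ u := by
      have := hbidx.1
      intro e
      omega
    have hru : pvReach p u r := pvReach_ofFuel hroot hfix
    have hbr : pvReach p (pvGet p u) r := by
      cases hru with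
      | refl _ hf => exact absurd hf hne
      | step _ _ _ h2 => exact h2
    obtain ⟨kb, hdb⟩ := pvDist_exists hbr
    have hkb := pvDist_lt hc hbidx hdb
    have hstep : pvRootF (kb + 1) p u = r := by
      show (if pvGet p u = u then u else pvRootF kb p (pvGet p u)) = r
      rw [if_neg hne]
      exact hdb.1
    have : k ≤ kb + 1 := by
      by_contra hgt
      exact hmin (kb + 1) (by omega) hstep
    omega

-- ---- updates ----

theorem pvAgree {p : List Int} {x v : Int} (hx : pvIdx p x) {y : Int} (hy0 : pvIdx p y)
    (havoid : ∀ j, pvRootF j p y ≠ x) (hcl : pvClosed p) :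
    ∀ j, pvRootF j (PySem.List.pySetD p x v) y = pvRootF j p y := by
  have H : ∀ (j : Nat) (y : Int), pvIdx p y → (∀ j2, pvRootF j2 p y ≠ x) →
      pvRootF j (PySem.List.pySetD p x v) y = pvRootF j p y := by
    intro j
    induction j with
    | zero => intro y _ _; rfl
    | succ j ih =>
      intro y hy havo
      have hyx : y ≠ x := by
        have h0 := havo 0
        simpa [pvRootF] using h0
      have hget : pvGet (PySem.List.pySetD p x v) y = pvGet p y := by
        rw [pvGet_set p x y v hx hy.1, if_neg hyx]
      show (if pvGet (PySem.List.pySetD p x v) y = y then y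
            else pvRootF j (PySem.List.pySetD p x v) (pvGet (PySem.List.pySetD p x v) y)) =
           (if pvGet p y = y then y else pvRootF j p (pvGet p y))
      rw [hget]
      by_cases hf : pvGet p y = y
      · rw [if_pos hf, if_pos hf]
      · rw [if_neg hf, if_neg hf]
        refine ih (pvGet p y) (hcl y hy) ?_
        intro j2
        have h3 := havo (j2 + 1)
        rwa [show pvRootF (j2 + 1) p y = pvRootF j2 p (pvGet p y) from by
          simp [pvRootF, hf]] at h3
  exact fun j => H j y hy0 havoid

theorem pvNoCycle {p : List Int} {x : Int} (h1 : pvGet p x ≠ x)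
    (h2 : pvGet p (pvGet p x) = x) {s : Int} : ¬ pvReach p x s := by
  intro hre
  have aux : ∀ y s2, pvReach p y s2 → y = x ∨ y = pvGet p x → False := by
    intro y s2 hr
    induction hr with
    | refl z hf =>
      intro hz
      rcases hz with rfl | rfl
      · exact h1 hf
      · rw [h2] at hf
        exact h1 hf.symm
    | step z s2 hne hrec ih =>
      intro hz
      rcases hz with rfl | rfl
      · exact ih (Or.inr rfl)
      · exact ih (Or.inl h2)
  exact aux x s hre (Or.inl rfl)

theorem pvCompress {p : List Int} {x : Int} (hc : pvClosed p) (hx : pvIdx p x)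
    (hne : pvGet p x ≠ x) :
    pvClosed (PySem.List.pySetD p x (pvGet p (pvGet p x))) ∧
    (∀ y s, pvIdx p y → pvReach p y s → pvReach (PySem.List.pySetD p x (pvGet p (pvGet p x))) y s) := by
  constructor
  · intro z hz
    have hz2 : pvIdx p z := (pvIdx_set_iff p x _ z).mp hz
    rw [pvIdx_set_iff]
    rw [pvGet_set p x z _ hx hz2.1]
    split
    · exact hc _ (hc x hx)
    · exact hc z hz2
  · have H : ∀ y s, pvReach p y s → pvIdx p y →
        pvReach (PySem.List.pySetD p x (pvGet p (pvGet p x))) y s := by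
      intro y s hr
      induction hr with
      | refl z hf =>
        intro hy
        have hzx : z ≠ x := by
          intro e
          rw [e] at hf
          exact hne hf
        refine pvReach.refl _ ?_
        rw [pvGet_set p x z _ hx hy.1, if_neg hzx]
        exact hf
      | step z s hne2 hrec ih =>
        intro hy
        by_cases hzx : z = x
        · subst hzx
          have ihv : pvReach (PySem.List.pySetD p z (pvGet p (pvGet p z))) (pvGet p z) s :=
            ih (hc z hy)
          have hax : pvGet p z ≠ z := hne2
          have e1 : pvGet (PySem.List.pySetD p z (pvGet p (pvGet p z))) z =
              pvGet p (pvGet p z) := by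
            rw [pvGet_set p z z _ hx hy.1, if_pos rfl]
          by_cases hga : pvGet p (pvGet p z) = pvGet p z
          · have hp1 : PySem.List.pySetD p z (pvGet p (pvGet p z)) = p := by
              rw [hga]
              exact pvSet_self p z ⟨by have := hy.1; omega, hy.2⟩
            rw [hp1]
            exact pvReach.step z s hne2 hrec
          · have haz : pvGet p z ≠ z := hne2
            cases ihv with
            | refl _ hf2 =>
              exfalso
              rw [pvGet_set p z _ _ hx (hc z hy).1, if_neg haz] at hf2
              exact hga hf2
            | step _ _ hq hq2 =>
              rw [pvGet_set p z _ _ hx (hc z hy).1, if_neg haz] at hq2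
              have hgx : pvGet p (pvGet p z) ≠ z := by
                intro e
                exact pvNoCycle hne2 e (pvReach.step z s hne2 hrec)
              refine pvReach.step _ _ ?_ ?_
              · rw [e1]
                exact hgx
              · rw [e1]
                exact hq2
        · have hget : pvGet (PySem.List.pySetD p x (pvGet p (pvGet p x))) z = pvGet p z := by
            rw [pvGet_set p x z _ hx hy.1, if_neg hzx]
          refine pvReach.step _ _ ?_ ?_
          · rw [hget]
            exact hne2
          · rw [hget]
            exact ih (hc z hy)
    exact fun y s hy hr => H y s hr hy

theorem pvLink {p : List Int} {ra rb : Int} (hc : pvClosed p) (hra : pvGet p ra = ra)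
    (hrb : pvGet p rb = rb) (hia : pvIdx p ra) (hib : pvIdx p rb) (hne : ra ≠ rb) :
    pvClosed (PySem.List.pySetD p rb ra) ∧
    (∀ y s, pvIdx p y → pvReach p y s → pvReach (PySem.List.pySetD p rb ra) y (if s = rb then ra else s)) := by
  constructor
  · intro z hz
    have hz2 : pvIdx p z := (pvIdx_set_iff p rb ra z).mp hz
    rw [pvIdx_set_iff]
    rw [pvGet_set p rb z ra hib hz2.1]
    split
    · exact hia
    · exact hc z hz2
  · have H : ∀ y s, pvReach p y s → pvIdx p y →
        pvReach (PySem.List.pySetD p rb ra) y (if s = rb then ra else s) := by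
      intro y s hr
      induction hr with
      | refl z hf =>
        intro hy
        by_cases hzb : z = rb
        · subst hzb
          rw [if_pos rfl]
          refine pvReach.step _ _ ?_ ?_
          · rw [pvGet_set p z z ra hib hy.1, if_pos rfl]
            exact hne
          · rw [pvGet_set p z z ra hib hy.1, if_pos rfl]
            refine pvReach.refl _ ?_
            rw [pvGet_set p z ra ra hib hia.1, if_neg hne]
            exact hra
        · rw [if_neg hzb]
          refine pvReach.refl _ ?_
          rw [pvGet_set p rb z ra hib hy.1, if_neg hzb]
          exact hf
      | step z s hne2 hrec ih =>
        intro hy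
        have hzb : z ≠ rb := by
          intro e
          rw [e, hrb] at hne2
          exact hne2 rfl
        refine pvReach.step _ _ ?_ ?_
        · rw [pvGet_set p rb z ra hib hy.1, if_neg hzb]
          exact hne2
        · rw [pvGet_set p rb z ra hib hy.1, if_neg hzb]
          exact ih (hc z hy)
    exact fun y s hy hr => H y s hr hy

-- ---- find and union ----

theorem dsuFind_spec : ∀ (k : Nat) (p : List Int) (x r : Int) (fuel : Nat),
    pvClosed p → pvInR p.length x → pvDist p x r k → k < fuel →
    (dsuFind fuel p x).2 = r ∧ (dsuFind fuel p x).1.length = p.length ∧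
    pvClosed (dsuFind fuel p x).1 ∧
    (∀ y s, pvIdx p y → pvReach p y s → pvReach (dsuFind fuel p x).1 y s) := by
  intro k
  induction k using Nat.strong_induction_on with
  | _ k IH =>
  intro p x r fuel hc hx hd hk
  obtain ⟨hroot, hfix, hmin⟩ := hd
  cases fuel with
  | zero => omega
  | succ f =>
  simp only [dsuFind]
  by_cases h1 : pvGet p x = x
  · rw [if_pos h1]
    have hr : r = x := by
      rw [pvRootF_stable h1 k] at hroot
      exact hroot.symm
    subst hr
    exact ⟨rfl, rfl, hc, fun y s _ h => h⟩
  · rw [if_neg h1]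
    have haidx : pvIdx p (pvGet p x) := pvGet_idx_ofInR p x hc hx
    have hk1 : k ≠ 0 := by
      intro e
      subst e
      have : r = x := hroot.symm
      rw [this] at hfix
      exact h1 hfix
    by_cases h2 : pvGet p (pvGet p x) = pvGet p x
    · -- parent is a root: the compression write is a no-op and we return the parent
      have hr : r = pvGet p x := by
        obtain ⟨m, hm⟩ : ∃ m, k = m + 1 := ⟨k - 1, by omega⟩
        rw [hm] at hroot
        have e1 : pvRootF (m + 1) p x = pvRootF m p (pvGet p x) := by
          show (if pvGet p x = x then x else pvRootF m p (pvGet p x)) = _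
          rw [if_neg h1]
        rw [e1, pvRootF_stable h2] at hroot
        exact hroot.symm
      have hp1 : PySem.List.pySetD p x (pvGet p (pvGet p x)) = p := by
        rw [h2]
        exact pvSet_self p x hx
      rw [hp1]
      have hda : pvDist p (pvGet p x) r 0 := by
        refine ⟨hr.symm, hfix, ?_⟩
        intro j hj
        omega
      obtain ⟨c1, c2, c3, c4⟩ := IH 0 (by omega) p (pvGet p x) r f hc
        ⟨by have := haidx.1; omega, haidx.2⟩ hda (by omega)
      exact ⟨c1, c2, c3, fun y s hy hr2 => c4 y s hy hr2⟩
    · -- real compression step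
      obtain ⟨x2, hx20, hx2lt, hgx2, hsetx2, hqget⟩ :
          ∃ x2, 0 ≤ x2 ∧ x2 < (p.length : Int) ∧ pvGet p x2 = pvGet p x ∧
            (∀ v, PySem.List.pySetD p x v = PySem.List.pySetD p x2 v) ∧
            (∀ q : List Int, q.length = p.length → pvGet q x = pvGet q x2) := by
        by_cases hxn : 0 ≤ x
        · exact ⟨x, hxn, hx.2, rfl, fun v => rfl, fun q _ => rfl⟩
        · refine ⟨x + p.length, by have := hx.1; omega, by omega,
            (pvGet_wrap p x hx.1 (by omega)).symm,
            fun v => pvSet_wrap p x v hx.1 (by omega), ?_⟩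
          intro q hq
          have := pvGet_wrap q x (by rw [hq]; exact hx.1) (by omega)
          rw [this, hq]
      have hne2 : pvGet p x2 ≠ x2 := by
        intro e
        apply h2
        rw [hgx2] at e
        rw [e, hgx2]
        exact e
      have hk2 : 2 ≤ k := by
        by_contra hcon
        have hk1e : k = 1 := by omega
        rw [hk1e] at hroot
        have e1 : pvRootF 1 p x = pvGet p x := by
          show (if pvGet p x = x then x else pvRootF 0 p (pvGet p x)) = _
          rw [if_neg h1]
          rfl
        rw [e1] at hroot
        exact h2 (by rw [hroot, hfix])
      have hpeel : ∀ m, pvRootF (m + 2) p x = pvRootF m p (pvGet p (pvGet p x)) := by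
        intro m
        have e1 : pvRootF (m + 2) p x = pvRootF (m + 1) p (pvGet p x) := by
          show (if pvGet p x = x then x else pvRootF (m + 1) p (pvGet p x)) = _
          rw [if_neg h1]
        have e2 : pvRootF (m + 1) p (pvGet p x) = pvRootF m p (pvGet p (pvGet p x)) := by
          show (if pvGet p (pvGet p x) = pvGet p x then pvGet p x
                else pvRootF m p (pvGet p (pvGet p x))) = _
          rw [if_neg h2]
        rw [e1, e2]
      have hroot2 : pvRootF (k - 2) p (pvGet p (pvGet p x)) = r := by
        have hp := hpeel (k - 2)
        rw [show k - 2 + 2 = k from by omega] at hp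
        rw [← hp]
        exact hroot
      have hrne : r ≠ x2 := by
        intro e
        rw [e] at hfix
        exact hne2 hfix
      have havoid : ∀ j, pvRootF j p (pvGet p (pvGet p x)) ≠ x2 := by
        intro j hcontra
        have hj2 : pvRootF (j + 2) p x = x2 := by
          rw [hpeel j]
          exact hcontra
        by_cases hle : k ≤ j + 2
        case pos =>
          have := pvRootF_ge hroot hfix hle
          rw [this] at hj2
          exact hrne hj2
        case neg =>
          have hlt : j + 2 < k := by omega
          have e1 : pvRootF 1 p x = pvGet p x := by
            show (if pvGet p x = x then x else pvRootF 0 p (pvGet p x)) = _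
            rw [if_neg h1]
            rfl
          have e3 : pvRootF (j + 3) p x = pvGet p x := by
            have hadd := pvRootF_add (j + 2) 1 p x
            rw [show j + 2 + 1 = j + 3 from by omega] at hadd
            rw [hadd, hj2]
            show (if pvGet p x2 = x2 then x2 else pvRootF 0 p (pvGet p x2)) = _
            rw [if_neg hne2]
            show pvGet p x2 = pvGet p x
            exact hgx2
          have hperiod : ∀ m, pvRootF (1 + m) p x = pvRootF (j + 3 + m) p x := by
            intro m
            rw [pvRootF_add 1 m, pvRootF_add (j + 3) m, e1, e3]
          have hsmall : pvRootF (1 + (k - (j + 3))) p x = r := by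
            rw [hperiod, show j + 3 + (k - (j + 3)) = k from by omega]
            exact hroot
          exact hmin _ (by omega) hsmall
      have hgidx : pvIdx p (pvGet p (pvGet p x)) := hc _ haidx
      have hx2idx : pvIdx p x2 := ⟨hx20, hx2lt⟩
      have hval : pvGet p (pvGet p x2) = pvGet p (pvGet p x) := by rw [hgx2]
      have hsets : PySem.List.pySetD p x (pvGet p (pvGet p x)) =
          PySem.List.pySetD p x2 (pvGet p (pvGet p x2)) := by
        rw [hsetx2, hval]
      obtain ⟨hcl1, hpres1⟩ := pvCompress hc hx2idx hne2
      have hagree : ∀ j, pvRootF j (PySem.List.pySetD p x2 (pvGet p (pvGet p x2)))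
          (pvGet p (pvGet p x)) = pvRootF j p (pvGet p (pvGet p x)) := by
        intro j
        exact pvAgree hx2idx hgidx havoid hc j
      have hridx : pvIdx p r := by
        rw [← hroot2]
        exact pvRootF_idx hc hgidx _
      have hrfix1 : pvGet (PySem.List.pySetD p x2 (pvGet p (pvGet p x2))) r = r := by
        rw [pvGet_set p x2 r _ hx2idx hridx.1, if_neg hrne]
        exact hfix
      have hd1 : pvDist (PySem.List.pySetD p x2 (pvGet p (pvGet p x2)))
          (pvGet p (pvGet p x)) r (k - 2) := by
        refine ⟨by rw [hagree]; exact hroot2, hrfix1, ?_⟩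
        intro j hj hcon
        rw [hagree] at hcon
        exact hmin (j + 2) (by omega) (by rw [hpeel]; exact hcon)
      have hstart : pvGet (PySem.List.pySetD p x (pvGet p (pvGet p x))) x =
          pvGet p (pvGet p x) := by
        rw [hsets]
        rw [hqget _ (by rw [pvLen_set])]
        rw [pvGet_set p x2 x2 _ hx2idx hx20, if_pos rfl, hval]
      obtain ⟨c1, c2, c3, c4⟩ := IH (k - 2) (by omega)
        (PySem.List.pySetD p x2 (pvGet p (pvGet p x2))) (pvGet p (pvGet p x)) r f hcl1
        (by rw [pvLen_set]; exact ⟨by have := hgidx.1; omega, hgidx.2⟩) hd1 (by omega)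
      rw [hstart, hsets]
      refine ⟨c1, by rw [c2, pvLen_set], c3, ?_⟩
      intro y s hy hr2
      refine c4 y s ?_ (hpres1 y s hy hr2)
      rw [pvIdx_set_iff]
      exact hy

theorem pvIdx_of_len {p q : List Int} (h : q.length = p.length) {y : Int} :
    pvIdx p y → pvIdx q y := by
  unfold pvIdx
  rw [h]
  exact id

theorem dsuUnion_spec (p rk : List Int) (u v : Int) (hc : pvClosed p) (ht : pvTotal p)
    (hu : pvInR p.length u) (hv : pvInR p.length v) :
    ∃ ru rv,
      pvReach p (if u < 0 then u + p.length else u) ru ∧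
      pvReach p (if v < 0 then v + p.length else v) rv ∧
      (dsuUnion p rk u v).2.1.length = p.length ∧ pvClosed (dsuUnion p rk u v).2.1 ∧
      ((ru = rv → (dsuUnion p rk u v).1 = false ∧
        ∀ y s, pvIdx p y → pvReach p y s → pvReach (dsuUnion p rk u v).2.1 y s) ∧
       (ru ≠ rv → (dsuUnion p rk u v).1 = true ∧
        ∃ w l, ((w = ru ∧ l = rv) ∨ (w = rv ∧ l = ru)) ∧
          ∀ y s, pvIdx p y → pvReach p y s → pvReach (dsuUnion p rk u v).2.1 y (if s = l then w else s))) := by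
  obtain ⟨hu1, hu2⟩ := hu
  obtain ⟨hv1, hv2⟩ := hv
  have hxuidx : pvIdx p (if u < 0 then u + (p.length : Int) else u) := by
    split <;> exact ⟨by omega, by omega⟩
  have hxvidx : pvIdx p (if v < 0 then v + (p.length : Int) else v) := by
    split <;> exact ⟨by omega, by omega⟩
  obtain ⟨ru, hru⟩ := ht _ hxuidx
  obtain ⟨rv, hrv⟩ := ht _ hxvidx
  have hru2 : pvReach p u ru := by
    by_cases hneg : u < 0
    · rw [if_pos hneg] at hru
      exact (pvReach_wrap hc hu1 hneg).mpr hru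
    · rw [if_neg hneg] at hru
      exact hru
  obtain ⟨ku, hdu⟩ := pvDist_exists hru2
  have hku := pvDist_le hc ⟨hu1, hu2⟩ hdu
  obtain ⟨f1r, f1len, f1cl, f1pres⟩ :=
    dsuFind_spec ku p u ru (p.length + 1) hc ⟨hu1, hu2⟩ hdu (by omega)
  have hrvp1 : pvReach (dsuFind (p.length + 1) p u).1
      (if v < 0 then v + (p.length : Int) else v) rv := f1pres _ rv hxvidx hrv
  have hrv2 : pvReach (dsuFind (p.length + 1) p u).1 v rv := by
    by_cases hneg : v < 0
    · rw [if_pos hneg] at hrvp1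
      refine (pvReach_wrap f1cl (by rw [f1len]; exact hv1) hneg).mpr ?_
      rw [f1len]
      exact hrvp1
    · rw [if_neg hneg] at hrvp1
      exact hrvp1
  obtain ⟨kv, hdv⟩ := pvDist_exists hrv2
  have hkv := pvDist_le f1cl (by rw [f1len]; exact ⟨hv1, hv2⟩) hdv
  obtain ⟨f2r, f2len, f2cl, f2pres⟩ :=
    dsuFind_spec kv (dsuFind (p.length + 1) p u).1 v rv
      ((dsuFind (p.length + 1) p u).1.length + 1) f1cl
      (by rw [f1len]; exact ⟨hv1, hv2⟩) hdv (by omega)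
  refine ⟨ru, rv, hru, hrv, ?_⟩
  simp only [dsuUnion]
  by_cases hcond : (dsuFind (p.length + 1) p u).2 =
      (dsuFind ((dsuFind (p.length + 1) p u).1.length + 1) (dsuFind (p.length + 1) p u).1 v).2
  · rw [if_pos hcond]
    have hreq : ru = rv := by
      rw [f1r, f2r] at hcond
      exact hcond
    refine ⟨by rw [f2len, f1len], f2cl, ?_, ?_⟩
    · intro _
      refine ⟨rfl, ?_⟩
      intro y s hy hr
      exact f2pres y s (pvIdx_of_len f1len hy) (f1pres y s hy hr)
    · intro hne
      exact absurd hreq hne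
  · rw [if_neg hcond]
    have hrne : ru ≠ rv := by
      rw [f1r, f2r] at hcond
      exact hcond
    rw [f1r, f2r]
    have hp2ru : pvReach (dsuFind ((dsuFind (p.length + 1) p u).1.length + 1)
        (dsuFind (p.length + 1) p u).1 v).1 (if u < 0 then u + (p.length : Int) else u) ru :=
      f2pres _ ru (pvIdx_of_len f1len hxuidx) (f1pres _ ru hxuidx hru)
    have hp2rv : pvReach (dsuFind ((dsuFind (p.length + 1) p u).1.length + 1)
        (dsuFind (p.length + 1) p u).1 v).1 (if v < 0 then v + (p.length : Int) else v) rv :=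
      f2pres _ rv (pvIdx_of_len f1len hxvidx) (f1pres _ rv hxvidx hrv)
    have hfixru := pvReach_fix hp2ru
    have hfixrv := pvReach_fix hp2rv
    have hlen2 : (dsuFind ((dsuFind (p.length + 1) p u).1.length + 1)
        (dsuFind (p.length + 1) p u).1 v).1.length = p.length := by rw [f2len, f1len]
    have hidxru := pvReach_idx f2cl (pvIdx_of_len hlen2 hxuidx) hp2ru
    have hidxrv := pvReach_idx f2cl (pvIdx_of_len hlen2 hxvidx) hp2rv
    by_cases hrank : pvGet rk ru < pvGet rk rv
    · rw [if_pos hrank]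
      obtain ⟨hlcl, hlchar⟩ := pvLink f2cl hfixrv hfixru hidxrv hidxru (Ne.symm hrne)
      refine ⟨by rw [pvLen_set, f2len, f1len], hlcl, fun he => absurd he hrne, ?_⟩
      intro _
      refine ⟨rfl, rv, ru, Or.inr ⟨rfl, rfl⟩, ?_⟩
      intro y s hy hr
      exact hlchar y s (pvIdx_of_len hlen2 hy)
        (f2pres y s (pvIdx_of_len f1len hy) (f1pres y s hy hr))
    · rw [if_neg hrank]
      obtain ⟨hlcl, hlchar⟩ := pvLink f2cl hfixru hfixrv hidxru hidxrv hrne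
      refine ⟨by rw [pvLen_set, f2len, f1len], hlcl, fun he => absurd he hrne, ?_⟩
      intro _
      refine ⟨rfl, ru, rv, Or.inl ⟨rfl, rfl⟩, ?_⟩
      intro y s hy hr
      exact hlchar y s (pvIdx_of_len hlen2 hy)
        (f2pres y s (pvIdx_of_len f1len hy) (f1pres y s hy hr))

-- ---- the coupled fold ----

theorem swap_iff (ru rv w l s t cu cv cx cy : Int)
    (hwl : (w = ru ∧ l = rv) ∨ (w = rv ∧ l = ru)) (hr : ru ≠ rv)
    (h1 : s = t ↔ cx = cy) (h2 : s = ru ↔ cx = cu) (h3 : s = rv ↔ cx = cv)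
    (h4 : t = ru ↔ cy = cu) (h5 : t = rv ↔ cy = cv) :
    ((if s = l then w else s) = (if t = l then w else t) ↔
     (if cx = cv then cu else cx) = (if cy = cv then cu else cy)) := by
  rcases hwl with ⟨rfl, rfl⟩ | ⟨rfl, rfl⟩ <;> split_ifs <;> omega

theorem fold_step : ∀ (edges : List (Int × Int × Int × Int)) (p rk comp : List Int)
    (adj : List (List (Int × Int))) (n : Nat), pvInv n p comp →
    (∀ e ∈ edges, pvInR n e.2.1 ∧ pvInR n e.2.2.1) →
    (edges.foldl mstStepA (p, rk, adj)).2.2 = (edges.foldl mstStepB (comp, adj)).2 := by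
  intro edges
  induction edges with
  | nil => intro p rk comp adj n hInv hEd; rfl
  | cons e es ih =>
    intro p rk comp adj n hInv hEd
    obtain ⟨w, u, v, par⟩ := e
    obtain ⟨hplen, hclen, hcl, htot, hiff⟩ := hInv
    have hu' : pvInR p.length u := by
      rw [hplen]
      exact (hEd _ (List.mem_cons_self)).1
    have hv' : pvInR p.length v := by
      rw [hplen]
      exact (hEd _ (List.mem_cons_self)).2
    obtain ⟨hua, hub⟩ := hu'
    obtain ⟨hva, hvb⟩ := hv'
    obtain ⟨ru, rv, hru, hrv, hulen, hucl, hEq, hNe⟩ :=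
      dsuUnion_spec p rk u v hcl htot ⟨hua, hub⟩ ⟨hva, hvb⟩
    have hxuidx : pvIdx p (if u < 0 then u + (p.length : Int) else u) := by
      split <;> exact ⟨by omega, by omega⟩
    have hxvidx : pvIdx p (if v < 0 then v + (p.length : Int) else v) := by
      split <;> exact ⟨by omega, by omega⟩
    have hcompu : pvGet comp u = pvGet comp (if u < 0 then u + (p.length : Int) else u) := by
      by_cases hneg : u < 0
      · rw [if_pos hneg]
        have hw := pvGet_wrap comp u (by rw [hclen, ← hplen]; exact hua) hneg
        rw [hw]
        congr 1
        rw [hclen, hplen]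
      · rw [if_neg hneg]
    have hcompv : pvGet comp v = pvGet comp (if v < 0 then v + (p.length : Int) else v) := by
      by_cases hneg : v < 0
      · rw [if_pos hneg]
        have hw := pvGet_wrap comp v (by rw [hclen, ← hplen]; exact hva) hneg
        rw [hw]
        congr 1
        rw [hclen, hplen]
      · rw [if_neg hneg]
    have key : ∀ x y sx sy, pvIdx p x → pvIdx p y → pvReach p x sx → pvReach p y sy →
        (sx = sy ↔ pvGet comp x = pvGet comp y) := by
      intro x y sx sy hx hy hsx hsy
      rw [← hiff x y hx hy]
      constructor
      · intro he
        exact ⟨sx, hsx, by rw [he]; exact hsy⟩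
      · rintro ⟨t, htx, hty⟩
        exact (pvReach_unique hsx htx).trans (pvReach_unique hsy hty).symm
    simp only [List.foldl_cons]
    by_cases hrr : ru = rv
    · obtain ⟨hfalse, hpres⟩ := hEq hrr
      have hcc : pvGet comp u = pvGet comp v := by
        rw [hcompu, hcompv]
        exact (key _ _ ru rv hxuidx hxvidx hru hrv).mp hrr
      have hA : mstStepA (p, rk, adj) (w, u, v, par) =
          ((dsuUnion p rk u v).2.1, (dsuUnion p rk u v).2.2, adj) := by
        simp only [mstStepA]
        rw [hfalse]
        simp
      have hB : mstStepB (comp, adj) (w, u, v, par) = (comp, adj) := by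
        simp only [mstStepB]
        rw [if_neg (by simpa using hcc)]
      rw [hA, hB]
      refine ih _ _ _ _ n ⟨by rw [hulen, hplen], hclen, hucl, ?_, ?_⟩
        (fun e2 he2 => hEd e2 (List.mem_cons_of_mem _ he2))
      · intro x hx
        have hxp : pvIdx p x := pvIdx_of_len hulen.symm hx
        obtain ⟨s, hs⟩ := htot x hxp
        exact ⟨s, hpres x s hxp hs⟩
      · intro x y hx hy
        have hxp : pvIdx p x := pvIdx_of_len hulen.symm hx
        have hyp : pvIdx p y := pvIdx_of_len hulen.symm hy
        rw [← hiff x y hxp hyp]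
        constructor
        · rintro ⟨t, htx, hty⟩
          obtain ⟨sx, hsx⟩ := htot x hxp
          obtain ⟨sy, hsy⟩ := htot y hyp
          have e1 := pvReach_unique (hpres x sx hxp hsx) htx
          have e2 := pvReach_unique (hpres y sy hyp hsy) hty
          exact ⟨sx, hsx, by rw [e1.trans e2.symm]; exact hsy⟩
        · rintro ⟨t, htx, hty⟩
          exact ⟨t, hpres x t hxp htx, hpres y t hyp hty⟩
    · obtain ⟨htrue, wl, ll, hwl, hchar⟩ := hNe hrr
      have hcc : pvGet comp u ≠ pvGet comp v := by
        rw [hcompu, hcompv]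
        intro he
        exact hrr ((key _ _ ru rv hxuidx hxvidx hru hrv).mpr he)
      have hA : mstStepA (p, rk, adj) (w, u, v, par) =
          ((dsuUnion p rk u v).2.1, (dsuUnion p rk u v).2.2,
            PySem.List.pySetD (PySem.List.pySetD adj u (PySem.List.pyGetD adj u [] ++ [(v, par)])) v
              (PySem.List.pyGetD (PySem.List.pySetD adj u (PySem.List.pyGetD adj u [] ++ [(v, par)])) v []
                ++ [(u, par)])) := by
        simp only [mstStepA]
        rw [htrue]
        simp
      have hB : mstStepB (comp, adj) (w, u, v, par) =
          (comp.map (fun c => if c = pvGet comp v then pvGet comp u else c),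
            PySem.List.pySetD (PySem.List.pySetD adj u (PySem.List.pyGetD adj u [] ++ [(v, par)])) v
              (PySem.List.pyGetD (PySem.List.pySetD adj u (PySem.List.pyGetD adj u [] ++ [(v, par)])) v []
                ++ [(u, par)])) := by
        simp only [mstStepB]
        rw [if_pos hcc]
      rw [hA, hB]
      refine ih _ _ _ _ n
        ⟨by rw [hulen, hplen], by rw [List.length_map, hclen], hucl, ?_, ?_⟩
        (fun e2 he2 => hEd e2 (List.mem_cons_of_mem _ he2))
      · intro x hx
        have hxp : pvIdx p x := pvIdx_of_len hulen.symm hx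
        obtain ⟨sx, hsx⟩ := htot x hxp
        exact ⟨_, hchar x sx hxp hsx⟩
      · intro x y hx hy
        have hxp : pvIdx p x := pvIdx_of_len hulen.symm hx
        have hyp : pvIdx p y := pvIdx_of_len hulen.symm hy
        obtain ⟨sx, hsx⟩ := htot x hxp
        obtain ⟨sy, hsy⟩ := htot y hyp
        have hsame3 : pvSame (dsuUnion p rk u v).2.1 x y ↔
            ((if sx = ll then wl else sx) = (if sy = ll then wl else sy)) := by
          constructor
          · rintro ⟨t, htx, hty⟩
            have e1 := pvReach_unique (hchar x sx hxp hsx) htx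
            have e2 := pvReach_unique (hchar y sy hyp hsy) hty
            exact e1.trans e2.symm
          · intro he
            exact ⟨_, hchar x sx hxp hsx, by rw [he]; exact hchar y sy hyp hsy⟩
        rw [hsame3]
        have hcmx : pvGet (comp.map (fun c => if c = pvGet comp v then pvGet comp u else c)) x =
            (if pvGet comp x = pvGet comp v then pvGet comp u else pvGet comp x) :=
          pvGet_map comp _ x hxp.1 (by rw [hclen, ← hplen]; exact hxp.2)
        have hcmy : pvGet (comp.map (fun c => if c = pvGet comp v then pvGet comp u else c)) y =
            (if pvGet comp y = pvGet comp v then pvGet comp u else pvGet comp y) :=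
          pvGet_map comp _ y hyp.1 (by rw [hclen, ← hplen]; exact hyp.2)
        rw [hcmx, hcmy]
        exact swap_iff ru rv wl ll sx sy (pvGet comp u) (pvGet comp v)
          (pvGet comp x) (pvGet comp y) hwl hrr
          (key x y sx sy hxp hyp hsx hsy)
          (by rw [hcompu]; exact key x _ sx ru hxp hxuidx hsx hru)
          (by rw [hcompv]; exact key x _ sx rv hxp hxvidx hsx hrv)
          (by rw [hcompu]; exact key y _ sy ru hyp hxuidx hsy hru)
          (by rw [hcompv]; exact key y _ sy rv hyp hxvidx hsy hrv)

theorem pvInv_init (M : Int) :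
    pvInv (M.toNat) (PySem.List.pyRange 0 M 1) (PySem.List.pyRange 0 M 1) := by
  have hlen : (PySem.List.pyRange 0 M 1).length = M.toNat := by
    rw [PySem.List.length_pyRange_one]
    simp
  have hself : ∀ x, pvIdx (PySem.List.pyRange 0 M 1) x → pvGet (PySem.List.pyRange 0 M 1) x = x := by
    intro x hx
    rw [pvGet_nonneg _ _ hx.1, List.getD_eq_getElem _ _ (by
      have h1 := hx.1
      have h2 := hx.2
      omega)]
    rw [PySem.List.getElem_pyRange_one]
    have h1 := hx.1
    omega
  have hronly : ∀ x s, pvIdx (PySem.List.pyRange 0 M 1) x →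
      pvReach (PySem.List.pyRange 0 M 1) x s → s = x := by
    intro x s hx h
    cases h with
    | refl => rfl
    | step _ _ hne _ => exact absurd (hself x hx) hne
  refine ⟨hlen, hlen, ?_, ?_, ?_⟩
  · intro x hx
    rw [hself x hx]
    exact hx
  · intro x hx
    exact ⟨x, pvReach.refl x (hself x hx)⟩
  · intro x y hx hy
    constructor
    · rintro ⟨s, hsx, hsy⟩
      rw [hself x hx, hself y hy]
      rw [← hronly x s hx hsx, ← hronly y s hy hsy]
    · intro h
      rw [hself x hx, hself y hy] at h
      exact ⟨x, pvReach.refl x (hself x hx), by rw [h]; exact pvReach.refl y (hself y hy)⟩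

-- ===== VERDICT (by name: the statement is the Claim_ definition above) =====
theorem mst_forest_spec : Claim_equal_mst_forest := by
  intro M edges _hD hPre
  unfold Spec_mst_forest mst_forest mst_forest_alt
  apply fold_step edges _ _ _ _ M.toNat (pvInv_init M)
  intro e he
  rcases hPre e he with ⟨⟨h1, h2⟩, h3, h4⟩
  have hM : 0 < M := by omega
  constructor <;> constructor <;> omega
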